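-- pv_equiv track=rewrite | github.com/hth810/pythonlc | 周赛/自己/给边赋权值的方案数 I.py | assignEdgeWeights
-- ===== SOURCE A (Python) =====
-- from typing import List
--
-- MOD=10**9+7
--
-- def assignEdgeWeights(edges: List[List[int]]) -> int:
--     n=max(e for _,e in edges)
--     tree=[[] for _ in range(n+1)]
--     for i,j in edges:
--         tree[i].append(j)
--         tree[j].append(i)
--     q=[]
--     q.append(1)
--     vis=[0]*(n+1)
--     vis[1]=1
--     dep=-1
--     while q:
--         tmp=q
--         q=[]
--         dep+=1
--         for i in tmp:
--             for j in tree[i]: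
--                 if vis[j]!=1:
--                     q.append(j)
--                     vis[j]=1
--     if dep==0:
--         return 0
--     else:
--         return pow(2,dep-1,MOD)
-- ===== SOURCE B (Python) =====
-- from typing import List
--
-- MOD = 10**9 + 7
--
-- def assignEdgeWeights(edges: List[List[int]]) -> int:
--     # No adjacency list and no queue: label every node with its BFS distance
--     # by level-synchronous relaxation passes over the raw edge list.
--     n = max(e for _, e in edges)
--     dist = [-1] * (n + 1)
--     dist[1] = 0
--     d = 0
--     while True:
--         found = False
--         for a, b in edges:
--             if dist[a] == d and dist[b] < 0:
--                 dist[b] = d + 1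
--                 found = True
--             elif dist[b] == d and dist[a] < 0:
--                 dist[a] = d + 1
--                 found = True
--         if not found:
--             break
--         d += 1
--     return 0 if d == 0 else pow(2, d - 1, MOD)
-- ===== Notes on version B (the rewrite author's own statement) =====
-- stated objective: alternative
-- what changed: B builds no adjacency list and keeps no queue/frontier: it labels each node with its BFS distance by repeated level-synchronous relaxation passes over the raw edge list (Bellman-Ford-style), stopping when a pass labels nothing, and returns 2^(maxlevel-1) mod 1e9+7 from the pass counter.
import Mathlib
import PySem

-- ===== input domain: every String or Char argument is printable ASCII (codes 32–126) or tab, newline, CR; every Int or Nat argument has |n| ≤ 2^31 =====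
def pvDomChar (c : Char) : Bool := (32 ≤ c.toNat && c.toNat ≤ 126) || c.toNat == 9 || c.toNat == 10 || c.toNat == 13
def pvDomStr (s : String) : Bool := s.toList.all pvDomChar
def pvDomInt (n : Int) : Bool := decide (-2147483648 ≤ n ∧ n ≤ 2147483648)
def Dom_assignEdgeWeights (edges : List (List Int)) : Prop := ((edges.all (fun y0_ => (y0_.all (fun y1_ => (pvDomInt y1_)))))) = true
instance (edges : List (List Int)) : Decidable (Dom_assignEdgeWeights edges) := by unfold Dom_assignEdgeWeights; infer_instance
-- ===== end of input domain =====

-- B drops A's adjacency list and frontier queue entirely: it labels nodes with their BFS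
-- distance by repeated level-synchronous relaxation passes over the raw edge list
-- (objective: alternative; same results, different algorithm and data, O(depth·E) time).

def pvMOD : Int := 1000000007

-- Python list index with negative wraparound on a list of length n+1
-- (under Pre_ every index j satisfies -(n+1) ≤ j ≤ n, so this is exactly Python's indexing)
def pvNorm (n j : Int) : Int := if j < 0 then j + (n + 1) else j

-- tuple unpacking 'i, j = e' of a length-2 edge (exact under Pre_)
def pvE0 (e : List Int) : Int := PySem.List.pyGetD e 0 0
def pvE1 (e : List Int) : Int := PySem.List.pyGetD e 1 0

-- n = max(e for _, e in edges)  (Python max = left fold of binary max over the seconds)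
def pvMaxSecond (edges : List (List Int)) : Int :=
  match edges.map pvE1 with
  | [] => 0
  | h :: t => t.foldl max h

-- ===== PORT A =====
-- the two appends 'tree[i].append(j); tree[j].append(i)' for one edge; the length-(n+1)
-- Python list is modeled as a function on normalized indices, exact under Pre_
def pvAddEdge (n : Int) (t : Int → List Int) (e : List Int) : Int → List Int :=
  let i := pvE0 e
  let j := pvE1 e
  let t1 : Int → List Int := fun k => if k = pvNorm n i then t (pvNorm n i) ++ [j] else t k
  fun k => if k = pvNorm n j then t1 (pvNorm n j) ++ [i] else t1 k

def pvBuild (n : Int) (edges : List (List Int)) : Int → List Int :=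
  edges.foldl (pvAddEdge n) (fun _ => [])

-- the loop body 'if vis[j] != 1: q.append(j); vis[j] = 1'
def pvVisit (n : Int) (s : List Int × (Int → Int)) (j : Int) : List Int × (Int → Int) :=
  if s.2 (pvNorm n j) ≠ 1 then (s.1 ++ [j], fun k => if k = pvNorm n j then 1 else s.2 k) else s

-- the inner loop 'for j in tree[i]: …'
def pvInner (n : Int) (adj : Int → List Int) (s : List Int × (Int → Int)) (i : Int) :
    List Int × (Int → Int) :=
  (adj (pvNorm n i)).foldl (pvVisit n) s

-- A's while loop: swap the whole frontier, bump the level counter, expand every frontier node.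
-- Fuel n+2 is enough: each nonempty new frontier marks at least one of the n+1 slots.
def pvLoopA (n : Int) (adj : Int → List Int) :
    Nat → List Int → (Int → Int) → Int → Int
  | 0, _, _, dep => dep
  | fuel + 1, q, vis, dep =>
    if q = [] then dep
    else
      let s := q.foldl (pvInner n adj) ([], vis)
      pvLoopA n adj fuel s.1 s.2 (dep + 1)

def assignEdgeWeights (edges : List (List Int)) : Int :=
  let n := pvMaxSecond edges
  let adj := pvBuild n edges
  let vis : Int → Int := fun k => if k = 1 then 1 else 0
  let dep := pvLoopA n adj (n.toNat + 2) [1] vis (-1)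
  if dep = 0 then 0 else PySem.Int.powMod 2 (dep - 1).toNat pvMOD

-- ===== PORT B =====
-- one edge of B's relaxation pass: 'if dist[a]==d and dist[b]<0: dist[b]=d+1; found=True
--                                   elif dist[b]==d and dist[a]<0: dist[a]=d+1; found=True'
def pvRelax (n d : Int) (s : (Int → Int) × Bool) (e : List Int) : (Int → Int) × Bool :=
  let a := pvNorm n (pvE0 e)
  let b := pvNorm n (pvE1 e)
  if s.1 a = d ∧ s.1 b < 0 then (fun k => if k = b then d + 1 else s.1 k, true)
  else if s.1 b = d ∧ s.1 a < 0 then (fun k => if k = a then d + 1 else s.1 k, true)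
  else s

-- B's 'while True' loop: one relaxation pass over the whole edge list per level; stop when a
-- pass finds nothing. Fuel n+2 is enough: every productive pass labels a fresh slot.
def pvLoopC (n : Int) (edges : List (List Int)) : Nat → (Int → Int) → Int → Int
  | 0, _, d => d
  | fuel + 1, dist, d =>
    let s := edges.foldl (pvRelax n d) (dist, false)
    if s.2 = false then d else pvLoopC n edges fuel s.1 (d + 1)

def assignEdgeWeights_alt (edges : List (List Int)) : Int :=
  let n := pvMaxSecond edges
  let dist : Int → Int := fun k => if k = 1 then 0 else -1
  let d := pvLoopC n edges (n.toNat + 2) dist 0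
  if d = 0 then 0 else PySem.Int.powMod 2 (d - 1).toNat pvMOD

-- ===== PRECONDITION & SPEC =====
-- Pre_ is exactly where Python A returns: edges nonempty (else max() raises ValueError), every
-- edge of length 2 (else unpacking raises ValueError), n ≥ 1 (else vis[1] raises IndexError),
-- and every endpoint within Python's index range -(n+1) ≤ v ≤ n (else IndexError).
-- (Python B raises on exactly the same inputs, so nothing returned by A is excluded.)
def Pre_assignEdgeWeights (edges : List (List Int)) : Prop :=
  edges ≠ [] ∧ (∀ e ∈ edges, e.length = 2) ∧ 1 ≤ pvMaxSecond edges ∧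
    ∀ e ∈ edges, ∀ v ∈ e, -(pvMaxSecond edges + 1) ≤ v ∧ v ≤ pvMaxSecond edges

instance (edges : List (List Int)) : Decidable (Pre_assignEdgeWeights edges) := by
  unfold Pre_assignEdgeWeights; infer_instance

def pvWitness_assignEdgeWeights : List (List Int) := [[1, 2]]

def Spec_assignEdgeWeights (edges : List (List Int)) (out : Int) : Prop := out = assignEdgeWeights_alt edges
instance (edges : List (List Int)) (out : Int) : Decidable (Spec_assignEdgeWeights edges out) := by unfold Spec_assignEdgeWeights; infer_instance

-- ===== CLAIM (what is proved, stated in full; the proofs are below) =====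
def Claim_equal_assignEdgeWeights : Prop := ∀ (edges : List (List Int)), Dom_assignEdgeWeights edges → Pre_assignEdgeWeights edges → Spec_assignEdgeWeights edges (assignEdgeWeights edges)

-- ===== LEMMAS AND PROOFS =====

-- 'k is reachable in one step from the level-d frontier of dist along some edge of es'
def pvReach (n d : Int) (dist : Int → Int) (es : List (List Int)) (k : Int) : Prop :=
  ∃ e ∈ es, (pvNorm n (pvE0 e) = k ∧ dist (pvNorm n (pvE1 e)) = d) ∨
            (pvNorm n (pvE1 e) = k ∧ dist (pvNorm n (pvE0 e)) = d)

theorem pvReach_nil (n d : Int) (dist : Int → Int) (k : Int) :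
    ¬ pvReach n d dist [] k := by
  rintro ⟨e, he, _⟩; exact absurd he (List.not_mem_nil)

theorem pvReach_cons (n d : Int) (dist : Int → Int) (e : List Int) (t : List (List Int))
    (k : Int) :
    pvReach n d dist (e :: t) k ↔
      ((pvNorm n (pvE0 e) = k ∧ dist (pvNorm n (pvE1 e)) = d) ∨
       (pvNorm n (pvE1 e) = k ∧ dist (pvNorm n (pvE0 e)) = d)) ∨ pvReach n d dist t k := by
  constructor
  · rintro ⟨e', he', h⟩
    rcases List.mem_cons.mp he' with rfl | he'
    · exact Or.inl h
    · exact Or.inr ⟨e', he', h⟩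
  · rintro (h | ⟨e', he', h⟩)
    · exact ⟨e, List.mem_cons_self, h⟩
    · exact ⟨e', List.mem_cons_of_mem _ he', h⟩

-- characterization of A's inner visit fold
theorem pvInner_char (n : Int) :
    ∀ (l acc : List Int) (v : Int → Int) (L : List Int) (v' : Int → Int),
      (∀ j ∈ acc, v (pvNorm n j) = 1) →
      l.foldl (pvVisit n) (acc, v) = (L, v') →
      (∀ j ∈ L, v' (pvNorm n j) = 1) ∧
      (∀ k, v' k = 1 ↔ v k = 1 ∨ ∃ j ∈ L, pvNorm n j = k) ∧
      (∀ k, (∃ j ∈ L, pvNorm n j = k) ↔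
        (∃ j ∈ acc, pvNorm n j = k) ∨ (v k ≠ 1 ∧ ∃ j ∈ l, pvNorm n j = k)) := by
  intro l
  induction l with
  | nil =>
    intro acc v L v' Hacc h
    simp only [List.foldl_nil, Prod.mk.injEq] at h
    obtain ⟨hL, hv⟩ := h; subst hL; subst hv
    refine ⟨Hacc, fun k => ⟨fun h => Or.inl h, ?_⟩, fun k => ⟨fun h => Or.inl h, ?_⟩⟩
    · rintro (h | ⟨j, hj, rfl⟩); · exact h
      exact Hacc j hj
    · rintro (h | ⟨_, j, hj, _⟩); · exact h
      exact absurd hj List.not_mem_nil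
  | cons j0 t ih =>
    intro acc v L v' Hacc h
    simp only [List.foldl_cons] at h
    by_cases h0 : v (pvNorm n j0) = 1
    · have hstep : pvVisit n (acc, v) j0 = (acc, v) := by simp [pvVisit, h0]
      rw [hstep] at h
      obtain ⟨P1, P2, P3⟩ := ih acc v L v' Hacc h
      refine ⟨P1, P2, fun k => ?_⟩
      rw [P3 k]
      constructor
      · rintro (h | ⟨hv, j, hj, rfl⟩); · exact Or.inl h
        exact Or.inr ⟨hv, j, List.mem_cons_of_mem _ hj, rfl⟩
      · rintro (h | ⟨hv, j, hj, rfl⟩); · exact Or.inl h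
        rcases List.mem_cons.mp hj with rfl | hj
        · exact absurd h0 hv
        · exact Or.inr ⟨hv, j, hj, rfl⟩
    · have hstep : pvVisit n (acc, v) j0 =
          (acc ++ [j0], fun k => if k = pvNorm n j0 then 1 else v k) := by
        simp [pvVisit, h0]
      rw [hstep] at h
      set v1 : Int → Int := fun k => if k = pvNorm n j0 then 1 else v k with hv1
      have Hacc1 : ∀ j ∈ acc ++ [j0], v1 (pvNorm n j) = 1 := by
        intro j hj
        rcases List.mem_append.mp hj with hj | hj
        · by_cases he : pvNorm n j = pvNorm n j0 <;> simp [hv1, he, Hacc j hj]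
        · simp [List.mem_singleton.mp hj, hv1]
      obtain ⟨P1, P2, P3⟩ := ih (acc ++ [j0]) v1 L v' Hacc1 h
      have hmem1 : ∀ k, v1 k = 1 ↔ k = pvNorm n j0 ∨ v k = 1 := by
        intro k; by_cases he : k = pvNorm n j0 <;> simp [hv1, he]
      have hj0L : ∃ j ∈ L, pvNorm n j = pvNorm n j0 := by
        rw [P3]; exact Or.inl ⟨j0, by simp, rfl⟩
      refine ⟨P1, fun k => ?_, fun k => ?_⟩
      · rw [P2 k, hmem1 k]
        constructor
        · rintro ((rfl | h) | h)
          · exact Or.inr hj0L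
          · exact Or.inl h
          · exact Or.inr h
        · rintro (h | h); · exact Or.inl (Or.inr h)
          exact Or.inr h
      · rw [P3 k]
        constructor
        · rintro (⟨j, hj, rfl⟩ | ⟨hv, j, hj, rfl⟩)
          · rcases List.mem_append.mp hj with hj | hj
            · exact Or.inl ⟨j, hj, rfl⟩
            · rw [List.mem_singleton.mp hj]
              exact Or.inr ⟨h0, j0, by simp, rfl⟩
          · have hv' : v (pvNorm n j) ≠ 1 := by
              intro hh; exact hv ((hmem1 _).mpr (Or.inr hh))
            exact Or.inr ⟨hv', j, List.mem_cons_of_mem _ hj, rfl⟩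
        · rintro (⟨j, hj, rfl⟩ | ⟨hv, j, hj, rfl⟩)
          · exact Or.inl ⟨j, List.mem_append_left _ hj, rfl⟩
          · rcases List.mem_cons.mp hj with rfl | hj
            · exact Or.inl ⟨j, List.mem_append_right _ (by simp), rfl⟩
            · by_cases he : pvNorm n j = pvNorm n j0
              · exact Or.inl ⟨j0, List.mem_append_right _ (by simp), he.symm⟩
              · refine Or.inr ⟨?_, j, hj, rfl⟩
                intro h1k
                rcases (hmem1 _).mp h1k with h | h
                · exact he h
                · exact hv h
  -- end pvInner_char

-- characterization of one whole frontier round of A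
theorem pvRound_char (n : Int) (adj : Int → List Int) :
    ∀ (q acc : List Int) (v : Int → Int) (L : List Int) (v' : Int → Int),
      (∀ j ∈ acc, v (pvNorm n j) = 1) →
      q.foldl (pvInner n adj) (acc, v) = (L, v') →
      (∀ j ∈ L, v' (pvNorm n j) = 1) ∧
      (∀ k, v' k = 1 ↔ v k = 1 ∨ ∃ j ∈ L, pvNorm n j = k) ∧
      (∀ k, (∃ j ∈ L, pvNorm n j = k) ↔
        (∃ j ∈ acc, pvNorm n j = k) ∨
          (v k ≠ 1 ∧ ∃ i ∈ q, ∃ j ∈ adj (pvNorm n i), pvNorm n j = k)) := by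
  intro q
  induction q with
  | nil =>
    intro acc v L v' Hacc h
    simp only [List.foldl_nil, Prod.mk.injEq] at h
    obtain ⟨hL, hv⟩ := h; subst hL; subst hv
    refine ⟨Hacc, fun k => ⟨fun h => Or.inl h, ?_⟩, fun k => ⟨fun h => Or.inl h, ?_⟩⟩
    · rintro (h | ⟨j, hj, rfl⟩); · exact h
      exact Hacc j hj
    · rintro (h | ⟨_, i, hi, _⟩); · exact h
      exact absurd hi List.not_mem_nil
  | cons i0 rest ih =>
    intro acc v L v' Hacc h
    simp only [List.foldl_cons] at h
    rcases hS1 : pvInner n adj (acc, v) i0 with ⟨acc1, v1⟩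
    rw [hS1] at h
    obtain ⟨I1, I2, I3⟩ := pvInner_char n (adj (pvNorm n i0)) acc v acc1 v1 Hacc hS1
    obtain ⟨P1, P2, P3⟩ := ih acc1 v1 L v' I1 h
    have hacc1L : ∀ k, (∃ j ∈ acc1, pvNorm n j = k) → ∃ j ∈ L, pvNorm n j = k := by
      intro k hk; rw [P3 k]; exact Or.inl hk
    refine ⟨P1, fun k => ?_, fun k => ?_⟩
    · rw [P2 k, I2 k]
      constructor
      · rintro ((h | h) | h)
        · exact Or.inl h
        · exact Or.inr (hacc1L k h)
        · exact Or.inr h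
      · rintro (h | h); · exact Or.inl (Or.inl h)
        exact Or.inr h
    · rw [P3 k, I3 k]
      constructor
      · rintro ((h | ⟨hv, hj⟩) | ⟨hv1, i, hi, hj⟩)
        · exact Or.inl h
        · exact Or.inr ⟨hv, i0, List.mem_cons_self, hj⟩
        · have hv : v k ≠ 1 := by
            intro hk; exact hv1 ((I2 k).mpr (Or.inl hk))
          exact Or.inr ⟨hv, i, List.mem_cons_of_mem _ hi, hj⟩
      · rintro (h | ⟨hv, i, hi, hj⟩)
        · exact Or.inl (Or.inl h)
        · rcases List.mem_cons.mp hi with rfl | hi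
          · exact Or.inl (Or.inr ⟨hv, hj⟩)
          · by_cases hk : ∃ j ∈ acc1, pvNorm n j = k
            · exact Or.inl ((I3 k).mp hk)
            · have hv1 : v1 k ≠ 1 := by
                intro h1
                rcases (I2 k).mp h1 with h | h
                · exact hv h
                · exact hk h
              exact Or.inr ⟨hv1, i, hi, hj⟩
  -- end pvRound_char

-- characterization of one relaxation pass of B over the edge list
theorem pvRelax_char (n d : Int) (dist0 : Int → Int) (hd : 0 ≤ d) :
    ∀ (es : List (List Int)) (v : Int → Int) (f : Bool) (v' : Int → Int) (f' : Bool),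
      (∀ k, v k = dist0 k ∨ (v k = d + 1 ∧ dist0 k < 0)) →
      es.foldl (pvRelax n d) (v, f) = (v', f') →
      (∀ k, v' k = dist0 k ∨ (v' k = d + 1 ∧ dist0 k < 0)) ∧
      (∀ k, dist0 k < 0 → (v' k = d + 1 ↔ (v k = d + 1 ∨ pvReach n d dist0 es k))) ∧
      (f' = true ↔ f = true ∨ ∃ k, dist0 k < 0 ∧ v k ≠ d + 1 ∧ pvReach n d dist0 es k) := by
  intro es
  induction es with
  | nil =>
    intro v f v' f' Hmid h
    simp only [List.foldl_nil, Prod.mk.injEq] at h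
    obtain ⟨hv, hf⟩ := h; subst hv; subst hf
    refine ⟨Hmid, fun k _ => ⟨fun h => Or.inl h, ?_⟩, ⟨fun h => Or.inl h, ?_⟩⟩
    · rintro (h | h); · exact h
      exact absurd h (pvReach_nil n d dist0 _)
    · rintro (h | ⟨k, _, _, h⟩); · exact h
      exact absurd h (pvReach_nil n d dist0 _)
  | cons e t ih =>
    intro v f v' f' Hmid h
    simp only [List.foldl_cons] at h
    have hvd : ∀ k, v k = d ↔ dist0 k = d := by
      intro k
      rcases Hmid k with hk | ⟨hk, hneg⟩
      · rw [hk]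
      · rw [hk]; constructor <;> intro hh <;> omega
    have hvneg : ∀ k, v k < 0 ↔ dist0 k < 0 ∧ v k ≠ d + 1 := by
      intro k
      rcases Hmid k with hk | ⟨hk, hneg⟩
      · rw [hk]; constructor; · intro hh; exact ⟨hh, by omega⟩
        exact fun hh => hh.1
      · rw [hk]; constructor <;> intro hh
        · omega
        · exact absurd rfl hh.2
    by_cases h1 : v (pvNorm n (pvE0 e)) = d ∧ v (pvNorm n (pvE1 e)) < 0
    · -- first branch fires: set slot b
      have hstep : pvRelax n d (v, f) e =
          (fun k => if k = pvNorm n (pvE1 e) then d + 1 else v k, true) := by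
        simp only [pvRelax]; rw [if_pos h1]
      rw [hstep] at h
      set b := pvNorm n (pvE1 e) with hbdef
      have hd0a : dist0 (pvNorm n (pvE0 e)) = d := (hvd _).mp h1.1
      have hd0b : dist0 b < 0 ∧ v b ≠ d + 1 := (hvneg _).mp h1.2
      set v1 : Int → Int := fun k => if k = b then d + 1 else v k with hv1
      have Hmid1 : ∀ k, v1 k = dist0 k ∨ (v1 k = d + 1 ∧ dist0 k < 0) := by
        intro k
        by_cases he : k = b
        · subst he; exact Or.inr ⟨by simp [hv1], hd0b.1⟩
        · simpa [hv1, he] using Hmid k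
      obtain ⟨Q1, Q2, Q3⟩ := ih v1 true v' f' Hmid1 h
      have hv1eq : ∀ k, v1 k = d + 1 ↔ (k = b ∨ v k = d + 1) := by
        intro k; by_cases he : k = b <;> simp [hv1, he]
      have hsingle : ∀ k, dist0 k < 0 →
          (((pvNorm n (pvE0 e) = k ∧ dist0 b = d) ∨ (b = k ∧ dist0 (pvNorm n (pvE0 e)) = d))
            ↔ k = b) := by
        intro k hneg
        constructor
        · rintro (⟨rfl, hh⟩ | ⟨rfl, _⟩)
          · omega
          · rfl
        · rintro rfl; exact Or.inr ⟨rfl, hd0a⟩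
      refine ⟨Q1, fun k hneg => ?_, ?_⟩
      · rw [Q2 k hneg, hv1eq k, pvReach_cons]
        rw [← hbdef]
        constructor
        · rintro ((rfl | h) | h)
          · exact Or.inr (Or.inl ((hsingle b hneg).mpr rfl))
          · exact Or.inl h
          · exact Or.inr (Or.inr h)
        · rintro (h | (h | h))
          · exact Or.inl (Or.inr h)
          · exact Or.inl (Or.inl ((hsingle k hneg).mp h))
          · exact Or.inr h
      · rw [Q3]
        constructor
        · intro _
          refine Or.inr ⟨b, hd0b.1, hd0b.2, ?_⟩
          rw [pvReach_cons, ← hbdef]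
          exact Or.inl (Or.inr ⟨rfl, hd0a⟩)
        · intro _; exact Or.inl rfl
    · by_cases h2 : v (pvNorm n (pvE1 e)) = d ∧ v (pvNorm n (pvE0 e)) < 0
      · -- second branch fires: set slot a
        have hstep : pvRelax n d (v, f) e =
            (fun k => if k = pvNorm n (pvE0 e) then d + 1 else v k, true) := by
          simp only [pvRelax]; rw [if_neg h1, if_pos h2]
        rw [hstep] at h
        set a := pvNorm n (pvE0 e) with hadef
        have hd0b : dist0 (pvNorm n (pvE1 e)) = d := (hvd _).mp h2.1
        have hd0a : dist0 a < 0 ∧ v a ≠ d + 1 := (hvneg _).mp h2.2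
        set v1 : Int → Int := fun k => if k = a then d + 1 else v k with hv1
        have Hmid1 : ∀ k, v1 k = dist0 k ∨ (v1 k = d + 1 ∧ dist0 k < 0) := by
          intro k
          by_cases he : k = a
          · subst he; exact Or.inr ⟨by simp [hv1], hd0a.1⟩
          · simpa [hv1, he] using Hmid k
        obtain ⟨Q1, Q2, Q3⟩ := ih v1 true v' f' Hmid1 h
        have hv1eq : ∀ k, v1 k = d + 1 ↔ (k = a ∨ v k = d + 1) := by
          intro k; by_cases he : k = a <;> simp [hv1, he]
        have hsingle : ∀ k, dist0 k < 0 →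
            (((a = k ∧ dist0 (pvNorm n (pvE1 e)) = d) ∨ (pvNorm n (pvE1 e) = k ∧ dist0 a = d))
              ↔ k = a) := by
          intro k hneg
          constructor
          · rintro (⟨rfl, _⟩ | ⟨rfl, hh⟩)
            · rfl
            · omega
          · rintro rfl; exact Or.inl ⟨rfl, hd0b⟩
        refine ⟨Q1, fun k hneg => ?_, ?_⟩
        · rw [Q2 k hneg, hv1eq k, pvReach_cons]
          rw [← hadef]
          constructor
          · rintro ((rfl | h) | h)
            · exact Or.inr (Or.inl ((hsingle a hneg).mpr rfl))
            · exact Or.inl h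
            · exact Or.inr (Or.inr h)
          · rintro (h | (h | h))
            · exact Or.inl (Or.inr h)
            · exact Or.inl (Or.inl ((hsingle k hneg).mp h))
            · exact Or.inr h
        · rw [Q3]
          constructor
          · intro _
            refine Or.inr ⟨a, hd0a.1, hd0a.2, ?_⟩
            rw [pvReach_cons, ← hadef]
            exact Or.inl (Or.inl ⟨rfl, hd0b⟩)
          · intro _; exact Or.inl rfl
      · -- neither branch fires
        have hstep : pvRelax n d (v, f) e = (v, f) := by
          simp only [pvRelax]; rw [if_neg h1, if_neg h2]
        rw [hstep] at h
        obtain ⟨Q1, Q2, Q3⟩ := ih v f v' f' Hmid h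
        have hnosingle : ∀ k, dist0 k < 0 → v k ≠ d + 1 →
            ¬ ((pvNorm n (pvE0 e) = k ∧ dist0 (pvNorm n (pvE1 e)) = d) ∨
               (pvNorm n (pvE1 e) = k ∧ dist0 (pvNorm n (pvE0 e)) = d)) := by
          rintro k hneg hnd (⟨rfl, hh⟩ | ⟨rfl, hh⟩)
          · exact h2 ⟨(hvd _).mpr hh, (hvneg _).mpr ⟨hneg, hnd⟩⟩
          · exact h1 ⟨(hvd _).mpr hh, (hvneg _).mpr ⟨hneg, hnd⟩⟩
        refine ⟨Q1, fun k hneg => ?_, ?_⟩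
        · rw [Q2 k hneg, pvReach_cons]
          constructor
          · rintro (h | h); · exact Or.inl h
            exact Or.inr (Or.inr h)
          · rintro (h | (h | h))
            · exact Or.inl h
            · by_cases hvk : v k = d + 1; · exact Or.inl hvk
              exact absurd h (hnosingle k hneg hvk)
            · exact Or.inr h
        · rw [Q3]
          constructor
          · rintro (h | ⟨k, hneg, hnd, hr⟩); · exact Or.inl h
            exact Or.inr ⟨k, hneg, hnd, (pvReach_cons ..).mpr (Or.inr hr)⟩
          · rintro (h | ⟨k, hneg, hnd, hr⟩); · exact Or.inl h
            rcases (pvReach_cons ..).mp hr with h | h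
            · exact absurd h (hnosingle k hneg hnd)
            · exact Or.inr ⟨k, hneg, hnd, h⟩
  -- end pvRelax_char

-- adjacency-list membership ↔ edge incidence
theorem pvBuild_mem_iff (n : Int) (edges : List (List Int)) (k j : Int) :
    j ∈ pvBuild n edges k ↔
      ∃ e ∈ edges, (pvNorm n (pvE0 e) = k ∧ j = pvE1 e) ∨
                   (pvNorm n (pvE1 e) = k ∧ j = pvE0 e) := by
  have main : ∀ (es : List (List Int)) (t0 : Int → List Int),
      j ∈ (es.foldl (pvAddEdge n) t0) k ↔
        j ∈ t0 k ∨ ∃ e ∈ es, (pvNorm n (pvE0 e) = k ∧ j = pvE1 e) ∨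
                             (pvNorm n (pvE1 e) = k ∧ j = pvE0 e) := by
    intro es
    induction es with
    | nil =>
      intro t0
      simp only [List.foldl_nil]
      constructor; · exact fun h => Or.inl h
      rintro (h | ⟨e, he, _⟩); · exact h
      exact absurd he List.not_mem_nil
    | cons e t ih =>
      intro t0
      simp only [List.foldl_cons]
      rw [ih (pvAddEdge n t0 e)]
      have hone : j ∈ pvAddEdge n t0 e k ↔
          j ∈ t0 k ∨ (pvNorm n (pvE0 e) = k ∧ j = pvE1 e) ∨
                     (pvNorm n (pvE1 e) = k ∧ j = pvE0 e) := by
        simp only [pvAddEdge]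
        split_ifs with h1 h2 h3 <;>
          simp_all [List.mem_append] <;> tauto
      rw [hone]
      constructor
      · rintro ((h | h) | ⟨e', he', h⟩)
        · exact Or.inl h
        · exact Or.inr ⟨e, List.mem_cons_self, h⟩
        · exact Or.inr ⟨e', List.mem_cons_of_mem _ he', h⟩
      · rintro (h | ⟨e', he', h⟩)
        · exact Or.inl (Or.inl h)
        · rcases List.mem_cons.mp he' with rfl | he'
          · exact Or.inl (Or.inr h)
          · exact Or.inr ⟨e', he', h⟩
  have h := main edges (fun _ => [])
  simpa [pvBuild] using h

-- number of still-unlabeled slots of the length-(n+1) distance array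
def pvUnB (n : Int) (dist : Int → Int) : Nat :=
  ((Finset.range (n.toNat + 1)).filter (fun k : Nat => dist (k : Int) < 0)).card

theorem pvUnB_lt (n : Int) (dist dist' : Int → Int) (k0 : Int)
    (hsub : ∀ k, dist' k < 0 → dist k < 0)
    (h0 : 0 ≤ k0) (h1 : k0 ≤ n) (hneg : dist k0 < 0) (hpos : ¬ dist' k0 < 0) :
    pvUnB n dist' < pvUnB n dist := by
  apply Finset.card_lt_card
  constructor
  · intro k hk
    simp only [Finset.mem_filter, Finset.mem_range] at hk ⊢
    exact ⟨hk.1, hsub _ hk.2⟩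
  · intro hcontra
    have hk0 : k0.toNat ∈ (Finset.range (n.toNat + 1)).filter (fun k : Nat => dist (k : Int) < 0) := by
      simp only [Finset.mem_filter, Finset.mem_range]
      constructor; · omega
      rw [Int.toNat_of_nonneg h0]; exact hneg
    have := hcontra hk0
    simp only [Finset.mem_filter, Finset.mem_range] at this
    rw [Int.toNat_of_nonneg h0] at this
    exact hpos this.2

theorem pvLoopA_nil (n : Int) (adj : Int → List Int) (fuel : Nat) (vis : Int → Int) (dep : Int) :
    pvLoopA n adj fuel [] vis dep = dep := by
  cases fuel <;> simp [pvLoopA]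

-- the bisimulation: A's frontier loop and B's relaxation loop compute the same level count
theorem pvLoop_eq (n : Int) (edges : List (List Int)) (adj : Int → List Int)
    (hadj : adj = pvBuild n edges)
    (hbound : ∀ e ∈ edges, ∀ x ∈ e, -(n + 1) ≤ x ∧ x ≤ n)
    (hlen : ∀ e ∈ edges, e.length = 2) :
    ∀ (fA : Nat) (fB : Nat) (q : List Int) (vis dist : Int → Int) (d : Int),
      0 ≤ d →
      (∀ k, vis k = 1 ↔ 0 ≤ dist k) →
      (∀ k, dist k = d ↔ ∃ j ∈ q, pvNorm n j = k) →
      (∀ k, dist k ≤ d) →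
      q ≠ [] →
      pvUnB n dist + 1 ≤ fA → pvUnB n dist + 1 ≤ fB →
      pvLoopA n adj fA q vis (d - 1) = pvLoopC n edges fB dist d := by
  intro fA
  induction fA with
  | zero => intro fB q vis dist d _ _ _ _ _ hfA _; omega
  | succ fA ih =>
    intro fB q vis dist d hd J1 J2 J3 hq hfA hfB
    cases fB with
    | zero => omega
    | succ fB =>
      -- unfold one round of each loop
      rcases hSA : q.foldl (pvInner n adj) (([] : List Int), vis) with ⟨L, vis'⟩
      rcases hSB : edges.foldl (pvRelax n d) (dist, false) with ⟨dist', fl⟩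
      have hA : pvLoopA n adj (fA + 1) q vis (d - 1) = pvLoopA n adj fA L vis' (d - 1 + 1) := by
        simp only [pvLoopA, hq, if_false, hSA]
      have hB : pvLoopC n edges (fB + 1) dist d =
          if fl = false then d else pvLoopC n edges fB dist' (d + 1) := by
        simp only [pvLoopC, hSB]
      obtain ⟨R1, R2, R3⟩ := pvRound_char n adj q [] vis L vis' (by intro j hj; cases hj) hSA
      obtain ⟨P1, P2, P3⟩ :=
        pvRelax_char n d dist hd edges dist false dist' fl (fun k => Or.inl rfl) hSB
      -- the two frontier-expansion conditions coincide
      have KEY : ∀ k, (vis k ≠ 1 ∧ ∃ i ∈ q, ∃ j ∈ adj (pvNorm n i), pvNorm n j = k) ↔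
          (dist k < 0 ∧ pvReach n d dist edges k) := by
        intro k
        have hv : vis k ≠ 1 ↔ dist k < 0 := by rw [ne_eq, J1]; omega
        rw [hv]
        apply and_congr_right
        intro _
        constructor
        · rintro ⟨i, hi, j, hj, rfl⟩
          rw [hadj, pvBuild_mem_iff] at hj
          obtain ⟨e, he, hcase⟩ := hj
          rcases hcase with ⟨h0, rfl⟩ | ⟨h0, rfl⟩
          · exact ⟨e, he, Or.inr ⟨rfl, by rw [h0, J2]; exact ⟨i, hi, rfl⟩⟩⟩
          · exact ⟨e, he, Or.inl ⟨rfl, by rw [h0, J2]; exact ⟨i, hi, rfl⟩⟩⟩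
        · rintro ⟨e, he, hcase⟩
          rcases hcase with ⟨hk, hfr⟩ | ⟨hk, hfr⟩
          · obtain ⟨i, hi, hni⟩ := (J2 _).mp hfr
            refine ⟨i, hi, pvE0 e, ?_, hk⟩
            rw [hadj, pvBuild_mem_iff, hni]
            exact ⟨e, he, Or.inr ⟨rfl, rfl⟩⟩
          · obtain ⟨i, hi, hni⟩ := (J2 _).mp hfr
            refine ⟨i, hi, pvE1 e, ?_, hk⟩
            rw [hadj, pvBuild_mem_iff, hni]
            exact ⟨e, he, Or.inl ⟨rfl, rfl⟩⟩
      have hLset : ∀ k, (∃ j ∈ L, pvNorm n j = k) ↔ (dist k < 0 ∧ pvReach n d dist edges k) := by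
        intro k
        rw [R3 k, ← KEY k]
        constructor
        · rintro (⟨j, hj, _⟩ | h); · exact absurd hj List.not_mem_nil
          exact h
        · exact fun h => Or.inr h
      have hdne : ∀ k, dist k ≠ d + 1 := by intro k; have := J3 k; omega
      -- the flag and the emptiness of the new frontier coincide
      have hflag : fl = true ↔ L ≠ [] := by
        rw [P3]
        constructor
        · rintro (h | ⟨k, hneg, _, hr⟩); · exact absurd h (by simp)
          obtain ⟨j, hj, _⟩ := (hLset k).mpr ⟨hneg, hr⟩
          intro hL; rw [hL] at hj; exact absurd hj List.not_mem_nil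
        · intro hL
          obtain ⟨j, hj⟩ := List.exists_mem_of_ne_nil L hL
          obtain ⟨hneg, hr⟩ := (hLset (pvNorm n j)).mp ⟨j, hj, rfl⟩
          exact Or.inr ⟨pvNorm n j, hneg, hdne _, hr⟩
      by_cases hL : L = []
      · -- final round: both return d
        have hfl : fl = false := by
          cases fl; · rfl
          exact absurd (hflag.mp rfl) (by simp [hL])
        rw [hA, hB, if_pos hfl, hL, pvLoopA_nil]
        omega
      · have hfl : fl = true := hflag.mpr hL
        rw [hA, hB, if_neg (by simp [hfl])]
        have hd1 : d - 1 + 1 = (d + 1) - 1 := by omega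
        rw [hd1]
        -- re-establish the invariant at level d + 1
        have hdist' : ∀ k, (dist k < 0 → (dist' k = d + 1 ↔ pvReach n d dist edges k)) ∧
            (0 ≤ dist k → dist' k = dist k) := by
          intro k
          constructor
          · intro hneg
            rw [P2 k hneg]
            constructor
            · rintro (h | h); · exact absurd h (hdne k)
              exact h
            · exact fun h => Or.inr h
          · intro hpos
            rcases P1 k with h | ⟨_, h⟩; · exact h
            omega
        have J1' : ∀ k, vis' k = 1 ↔ 0 ≤ dist' k := by
          intro k
          rw [R2 k, J1, hLset k]
          by_cases hneg : dist k < 0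
          · by_cases hr : pvReach n d dist edges k
            · have h1 : dist' k = d + 1 := ((hdist' k).1 hneg).mpr hr
              rw [h1]
              constructor
              · intro _; omega
              · intro _; exact Or.inr ⟨hneg, hr⟩
            · have h1 : dist' k = dist k := by
                rcases P1 k with h | ⟨h, _⟩
                · exact h
                · exact absurd (((hdist' k).1 hneg).mp h) hr
              rw [h1]
              constructor
              · rintro (hh | ⟨_, hr'⟩)
                · omega
                · exact absurd hr' hr
              · intro hh; omega
          · have h1 : dist' k = dist k := (hdist' k).2 (by omega)
            rw [h1]
            constructor
            · rintro (hh | ⟨hh, _⟩)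
              · exact hh
              · omega
            · intro hh; exact Or.inl hh
        have J2' : ∀ k, dist' k = d + 1 ↔ ∃ j ∈ L, pvNorm n j = k := by
          intro k
          rw [hLset k]
          by_cases hneg : dist k < 0
          · rw [(hdist' k).1 hneg]
            exact ⟨fun h => ⟨hneg, h⟩, fun h => h.2⟩
          · rw [(hdist' k).2 (by omega)]
            constructor
            · intro h; exact absurd h (hdne k)
            · intro h; omega
        have J3' : ∀ k, dist' k ≤ d + 1 := by
          intro k
          rcases P1 k with h | ⟨h, _⟩
          · rw [h]; have := J3 k; omega
          · omega
        -- fuel: the pass labeled at least one fresh in-range slot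
        obtain ⟨j, hj⟩ := List.exists_mem_of_ne_nil L hL
        obtain ⟨hneg0, hr0⟩ := (hLset (pvNorm n j)).mp ⟨j, hj, rfl⟩
        have hrange : 0 ≤ pvNorm n j ∧ pvNorm n j ≤ n := by
          obtain ⟨e, he, hcase⟩ := hr0
          have hb0 : ∀ x ∈ e, 0 ≤ pvNorm n x ∧ pvNorm n x ≤ n := by
            intro x hx
            have := hbound e he x hx
            unfold pvNorm
            split <;> omega
          have he0 : pvE0 e ∈ e := by
            apply PySem.List.pyGetD_mem
            unfold PySem.Raise.InRange
            rw [hlen e he]; omega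
          have he1 : pvE1 e ∈ e := by
            apply PySem.List.pyGetD_mem
            unfold PySem.Raise.InRange
            rw [hlen e he]; omega
          rcases hcase with ⟨hk, _⟩ | ⟨hk, _⟩
          · rw [← hk]; exact hb0 _ he0
          · rw [← hk]; exact hb0 _ he1
        have hfresh : ¬ dist' (pvNorm n j) < 0 := by
          rw [(hdist' _).1 hneg0 |>.mpr hr0]; omega
        have hsub : ∀ k, dist' k < 0 → dist k < 0 := by
          intro k hk
          rcases P1 k with h | ⟨h, _⟩; · omega
          omega
        have hcard := pvUnB_lt n dist dist' (pvNorm n j) hsub hrange.1 hrange.2 hneg0 hfresh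
        exact ih fB L vis' dist' (d + 1) (by omega) J1' J2' J3' hL (by omega) (by omega)
  -- end pvLoop_eq

-- ===== VERDICT (by name: the statement is the Claim_ definition above) =====
theorem assignEdgeWeights_spec : Claim_equal_assignEdgeWeights := by
  intro edges _ hPre
  obtain ⟨hne, hlen, hn, hbound⟩ := hPre
  unfold Spec_assignEdgeWeights
  simp only [assignEdgeWeights, assignEdgeWeights_alt]
  set n := pvMaxSecond edges with hn_def
  set adj := pvBuild n edges with hadj_def
  set vis0 : Int → Int := fun k => if k = 1 then 1 else 0 with hvis_def
  set dist0 : Int → Int := fun k => if k = 1 then 0 else -1 with hdist_def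
  have hUn : pvUnB n dist0 ≤ n.toNat := by
    have hsub : (Finset.range (n.toNat + 1)).filter (fun k : Nat => dist0 (k : Int) < 0) ⊆
        (Finset.range (n.toNat + 1)).erase 1 := by
      intro k hk
      simp only [Finset.mem_filter, Finset.mem_range] at hk
      simp only [Finset.mem_erase, Finset.mem_range]
      refine ⟨?_, hk.1⟩
      intro hk1
      have : dist0 ((1 : Nat) : Int) = 0 := by simp [hdist_def]
      rw [hk1] at hk
      omega
    have h1 : (1 : Nat) ∈ Finset.range (n.toNat + 1) := by
      simp only [Finset.mem_range]; omega
    calc pvUnB n dist0 ≤ ((Finset.range (n.toNat + 1)).erase 1).card :=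
          Finset.card_le_card hsub
      _ = n.toNat := by rw [Finset.card_erase_of_mem h1, Finset.card_range]; omega
  have hmain := pvLoop_eq n edges adj hadj_def hbound hlen
    (n.toNat + 2) (n.toNat + 2) [1] vis0 dist0 0
    (by omega)
    (by
      intro k
      by_cases hk : k = 1 <;> simp [hvis_def, hdist_def, hk])
    (by
      intro k
      by_cases hk : k = 1
      · subst hk
        simp only [hdist_def, if_pos rfl]
        constructor
        · intro _; exact ⟨1, by simp, by simp [pvNorm]⟩
        · intro _; trivial
      · simp only [hdist_def, if_neg hk]
        constructor
        · intro h; omega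
        · rintro ⟨j, hj, hjk⟩
          rw [List.mem_singleton.mp hj] at hjk
          simp [pvNorm] at hjk
          omega)
    (by intro k; by_cases hk : k = 1 <;> simp [hdist_def, hk])
    (by simp)
    (by omega) (by omega)
  have h01 : (0 : Int) - 1 = -1 := by omega
  rw [h01] at hmain
  rw [hmain]
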